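/- GENERATED by mk_final_copies.py from the proof of the farm's unit `inverse_mdct.5` (farm:inverse_mdct.5.1: Lemmas.lean) as the
   re-elaboration sweep compiled it — do not edit. -/
/-
  Unit inverse_mdct.5 — the pure lemmas of the walk in Proof.lean:
    * the 32-bit call arguments of step 3 as numbers (`sar`, `neg`, `sub`, `lea` on the dword `n`, `n2`, `n4`, `n8`);
    * the stack slots of FRAME0 as ONE structure over a memory (`Slots`) and its transport over a step of the segment
      (`keep_slot`, `Slots.carry`: one `Mem.SameExcept` per call instead of twenty slot transports);
    * what the precondition gives at the seven call sites (`callee_shadow`, `buf_live`, `tabA_live`, `log2_at`, `ilog_val`).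
-/
import Asan.CheckWalk
import Vorbis.Spec.MdctUse

open X86 X86.User Asan Vorbis Vorbis.Spec
open Vorbis.Spec.inverse_mdct

namespace Vorbis.Spec.inverse_mdct_5

variable {u₀ : State} {others : List Obj} {frames : List (Nat × FrameLayout)} {len : Nat} {A : Arena} {stored room : Int}
  {ysz : Nat → Nat} {k c : Nat} {ue : State} {ret : Word} {v : State}

/-! ### The call arguments as numbers -/

/-- `sar r32, s` of a non-negative 32-bit number is the division by `2 ^ s`. -/
theorem sar_toNat (N s : Nat) (h : N < 2 ^ 31) : ((BitVec.ofNat 32 N).sshiftRight s).toNat = N / 2 ^ s := by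
  have e : (BitVec.ofNat 32 N).toNat = N := by
    rw [BitVec.toNat_ofNat]
    omega
  have hm : (BitVec.ofNat 32 N).msb = false := by
    rw [BitVec.msb_eq_decide, e]
    simp only [decide_eq_false_iff_not, Nat.not_le]
    omega
  rw [BitVec.toNat_sshiftRight_of_msb_false hm, e, Nat.shiftRight_eq_div_pow]

/-- `n >> 4` as the walker leaves it in edi / ebx (`sar ebx, 4`). -/
theorem v_sar4 {N : Nat} (hn : Mdct.IsBlocksize N) :
    (Word.ofBV ((BitVec.ofNat 32 N).sshiftRight 4)).toNat = N / 16 := by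
  have hf := hn.facts
  rw [toNat_ofBV32, sar_toNat N 4 (by omega)]

/-- `n >> 5` as the walker leaves it in eax / edi / r13d (`sar eax, 5`). -/
theorem v_sar5 {N : Nat} (hn : Mdct.IsBlocksize N) :
    (Word.ofBV ((BitVec.ofNat 32 N).sshiftRight 5)).toNat = N / 32 := by
  have hf := hn.facts
  rw [toNat_ofBV32, sar_toNat N 5 (by omega)]

/-- `n2 − 1` (`sub r14d, 1`). -/
theorem v_n2m1 {N : Nat} (hn : Mdct.IsBlocksize N) :
    (BitVec.ofNat 32 (N / 2) - 1#32).toNat = N / 2 - 1 := by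
  have hf := hn.facts
  rw [BitVec.toNat_sub, BitVec.toNat_ofNat, BitVec.toNat_ofNat]
  omega

/-- `−n8` (`neg r12d`). -/
theorem v_negn8 {N : Nat} (hn : Mdct.IsBlocksize N) :
    (-BitVec.ofNat 32 (N / 8)).toNat = 2 ^ 32 - N / 8 := by
  have hf := hn.facts
  rw [BitVec.toNat_neg, BitVec.toNat_ofNat]
  omega

/-- `−(n >> 4)` (`neg ebx`). -/
theorem v_negn16 {N : Nat} (hn : Mdct.IsBlocksize N) :
    (-(BitVec.ofNat 32 N).sshiftRight 4).toNat = 2 ^ 32 - N / 16 := by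
  have hf := hn.facts
  rw [BitVec.toNat_neg, sar_toNat N 4 (by omega)]
  omega

/-- `n2 − 1 − n4` (`sub edx, esi`: the second iter0 call). -/
theorem v_i1 {N : Nat} (hn : Mdct.IsBlocksize N) :
    (BitVec.ofNat 32 (N / 2) - 1#32 - BitVec.ofNat 32 (N / 4)).toNat = N / 2 - 1 - N / 4 * 1 := by
  have hf := hn.facts
  rw [BitVec.toNat_sub, v_n2m1 hn, BitVec.toNat_ofNat]
  omega

/-- `n2 − 1 − n8` (`sub edx, r14d`: the second r_loop call). -/
theorem v_d1 {N : Nat} (hn : Mdct.IsBlocksize N) :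
    (BitVec.ofNat 32 (N / 2) - 1#32 - BitVec.ofNat 32 (N / 8)).toNat = N / 2 - 1 - N / 8 * 1 := by
  have hf := hn.facts
  rw [BitVec.toNat_sub, v_n2m1 hn, BitVec.toNat_ofNat]
  omega

/-- `n2 − 1 − 2·n8` (`lea eax, [r14 + r14] ; sub edx, eax`: the third r_loop call). -/
theorem v_d2 {N : Nat} (hn : Mdct.IsBlocksize N) :
    (BitVec.ofNat 32 (N / 2) - 1#32 -
      BitVec.setWidth 32 (Word.ofBV (BitVec.ofNat 32 (N / 8)) + Word.ofBV (BitVec.ofNat 32 (N / 8))).toBitVec).toNat =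
      N / 2 - 1 - N / 8 * 2 := by
  have hf := hn.facts
  rw [BitVec.toNat_sub, v_n2m1 hn, BitVec.toNat_setWidth, UInt64.toNat_toBitVec, UInt64.toNat_add, toNat_ofBV32,
    BitVec.toNat_ofNat]
  omega

/-- `n8 − 4·n8` (`lea eax, [r14*4] ; sub r14d, eax`), as a 32-bit pattern. -/
theorem v_m3n8 {N : Nat} (hn : Mdct.IsBlocksize N) :
    (BitVec.ofNat 32 (N / 8) - BitVec.setWidth 32 (Word.ofBV (BitVec.ofNat 32 (N / 8)) * 4).toBitVec).toNat =
      2 ^ 32 - 3 * (N / 8) := by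
  have hf := hn.facts
  have e4 : (4 : Word).toNat = 4 := rfl
  rw [BitVec.toNat_sub, BitVec.toNat_setWidth, UInt64.toNat_toBitVec, UInt64.toNat_mul, toNat_ofBV32,
    BitVec.toNat_ofNat, e4]
  omega

/-- `n2 − 1 − 3·n8` (`lea edx, [r15 + r14]`: the fourth r_loop call). -/
theorem v_d3 {N : Nat} (hn : Mdct.IsBlocksize N) :
    (BitVec.setWidth 32
      (Word.ofBV (BitVec.ofNat 32 (N / 2) - 1#32) +
        Word.ofBV (BitVec.ofNat 32 (N / 8) -
          BitVec.setWidth 32 (Word.ofBV (BitVec.ofNat 32 (N / 8)) * 4).toBitVec)).toBitVec).toNat =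
      N / 2 - 1 - N / 8 * 3 := by
  have hf := hn.facts
  rw [BitVec.toNat_setWidth, UInt64.toNat_toBitVec, UInt64.toNat_add, toNat_ofBV32, toNat_ofBV32, v_n2m1 hn, v_m3n8 hn]
  omega


/-! ### The stack slots over a step -/

/-- **The slot facts of FRAME0 that segment 5 carries over its seven calls**, at a memory `m`: the memory reads of `Body`,
`SlotsBuf`, `SlotsA` (but `q[rbp−40H] = A`, which the segment stores again), `SlotsS2` and `d[rbp−80H] = n4`. -/
structure Slots (A : Arena) (ue : State) (ret : Word) (m : Mem) : Prop where
  /-- the return address -/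
  retSlot : UInt64.ofNat (m.readLE (ue.reg .rsp) 8) = ret
  /-- `[rbp]`: the caller's rbp -/
  rbpSlot : UInt64.ofNat (m.readLE (ue.reg .rsp - 8) 8) = ue.reg .rbp
  /-- `[rbp − 8]`: the saved r15 -/
  r15Slot : UInt64.ofNat (m.readLE (ue.reg .rsp - 16) 8) = ue.reg .r15
  /-- `[rbp − 10H]`: the saved r14 -/
  r14Slot : UInt64.ofNat (m.readLE (ue.reg .rsp - 24) 8) = ue.reg .r14
  /-- `[rbp − 18H]`: the saved r13 -/
  r13Slot : UInt64.ofNat (m.readLE (ue.reg .rsp - 32) 8) = ue.reg .r13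
  /-- `[rbp − 20H]`: the saved r12 -/
  r12Slot : UInt64.ofNat (m.readLE (ue.reg .rsp - 40) 8) = ue.reg .r12
  /-- `[rbp − 28H]`: the saved rbx -/
  rbxSlot : UInt64.ofNat (m.readLE (ue.reg .rsp - 48) 8) = ue.reg .rbx
  /-- `q[rbp − 78H] = f` -/
  fSlot : UInt64.ofNat (m.readLE (ue.reg .rsp - 128) 8) = ue.reg .rdx
  /-- `d[rbp − 7CH] = bt` -/
  btSlot : m.readLE (ue.reg .rsp - 132) 4 = bt ue
  /-- `d[rbp − 90H] = save_point` -/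
  saveSlot : m.readLE (ue.reg .rsp - 152) 4 = A.T
  /-- `q[rbp − 68H] = v` -/
  vSlot : m.readLE (ue.reg .rsp - 112) 8 = tmp A ue
  /-- `q[rbp − 38H] = u` -/
  uSlot : UInt64.ofNat (m.readLE (ue.reg .rsp - 64) 8) = ue.reg .rdi
  /-- `d[rbp − 44H] = n` -/
  nSlot : m.readLE (ue.reg .rsp - 76) 4 = n ue
  /-- `q[rbp − A8H] = &u[n2]` -/
  uMidSlot : m.readLE (ue.reg .rsp - 176) 8 = buf ue + 4 * (n ue / 2)
  /-- `d[rbp − 70H] = n2` -/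
  n2Slot : m.readLE (ue.reg .rsp - 120) 4 = n ue / 2
  /-- `q[rbp − 88H] = 4·n2` -/
  n2x4Slot : m.readLE (ue.reg .rsp - 144) 8 = 4 * (n ue / 2)
  /-- `d[rbp − 8CH] = n8` -/
  n8Slot : m.readLE (ue.reg .rsp - 148) 4 = n ue / 8
  /-- `q[rbp − 98H] = 4·n2 − 32` -/
  n2x4m32Slot : m.readLE (ue.reg .rsp - 160) 8 = 4 * (n ue / 2) - 32
  /-- `q[rbp − A0H] = 4·n4` -/
  n4x4Slot : m.readLE (ue.reg .rsp - 168) 8 = 4 * (n ue / 4)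
  /-- `d[rbp − 80H] = n4` -/
  n4Slot : m.readLE (ue.reg .rsp - 136) 4 = n ue / 4

/-- **One slot of the frame through a step of segment 5**: a read inside `[rsp₀ − 184, rsp₀ + 8)` that misses the scratch area
`[rsp₀ − 104, rsp₀ − 76)` and the slot `q[rbp−40H]` sees the same bytes after a step that wrote only below the steady stack
pointer, those two holes, floats of the buffer and floats of the temp block (both off the stack region). -/
theorem keep_slot {A : Arena} {ue : State} {m m' : Mem}
    (hroom : 0x700000 + 368 ≤ (ue.reg .rsp).toNat) (htop : (ue.reg .rsp).toNat + 8 ≤ 0x800000)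
    (hbuf : buf ue + 4 * n ue ≤ 0x700000 ∨ 0x800000 ≤ buf ue)
    (htmp : tmp A ue + 2 * n ue ≤ 0x700000 ∨ 0x800000 ≤ tmp A ue)
    (hs : Mem.SameExcept
      [⟨(ue.reg .rsp).toNat - 368, (ue.reg .rsp).toNat - 184⟩, ⟨(ue.reg .rsp).toNat - 104, (ue.reg .rsp).toNat - 76⟩,
       ⟨(ue.reg .rsp).toNat - 72, (ue.reg .rsp).toNat - 64⟩, ⟨buf ue, buf ue + 4 * n ue⟩,
       ⟨tmp A ue, tmp A ue + 2 * n ue⟩] m m')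
    (d k : Nat) (hd : d ≤ 184) (hk : k ≤ 8)
    (h3 : 104 + k ≤ d ∨ (d ≤ 76 ∧ 72 + k ≤ d) ∨ d ≤ 64) :
    m'.readLE (ue.reg .rsp - UInt64.ofNat d) k = m.readLE (ue.reg .rsp - UInt64.ofNat d) k := by
  have hk64 : d < 2 ^ 64 := by omega
  have e : (ue.reg .rsp - UInt64.ofNat d).toNat = (ue.reg .rsp).toNat - d := by
    have hle : (UInt64.ofNat d) ≤ ue.reg .rsp := by
      rw [UInt64.le_iff_toNat_le, UInt64.toNat_ofNat', Nat.mod_eq_of_lt hk64]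
      omega
    rw [UInt64.toNat_sub_of_le _ _ hle, UInt64.toNat_ofNat', Nat.mod_eq_of_lt hk64]
  apply hs.readLE _ k (by omega)
  intro w hw
  rw [e]
  simp only [List.mem_cons, List.mem_nil_iff, or_false] at hw
  rcases hw with rfl | rfl | rfl | rfl | rfl <;> simp only [] <;> omega


/-- **The slots through a step of segment 5** (`keep_slot`, field by field). -/
theorem Slots.carry {A : Arena} {ue : State} {ret : Word} {m m' : Mem} (h : Slots A ue ret m)
    (hroom : 0x700000 + 368 ≤ (ue.reg .rsp).toNat) (htop : (ue.reg .rsp).toNat + 8 ≤ 0x800000)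
    (hbuf : buf ue + 4 * n ue ≤ 0x700000 ∨ 0x800000 ≤ buf ue)
    (htmp : tmp A ue + 2 * n ue ≤ 0x700000 ∨ 0x800000 ≤ tmp A ue)
    (hs : Mem.SameExcept
      [⟨(ue.reg .rsp).toNat - 368, (ue.reg .rsp).toNat - 184⟩, ⟨(ue.reg .rsp).toNat - 104, (ue.reg .rsp).toNat - 76⟩,
       ⟨(ue.reg .rsp).toNat - 72, (ue.reg .rsp).toNat - 64⟩, ⟨buf ue, buf ue + 4 * n ue⟩,
       ⟨tmp A ue, tmp A ue + 2 * n ue⟩] m m') :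
    Slots A ue ret m' := by
  have hk := fun d k => keep_slot (d := d) (k := k) hroom htop hbuf htmp hs
  constructor
  · have e := hk 0 8 (by omega) (by omega) (by omega)
    simp only [UInt64.reduceOfNat, UInt64.sub_zero] at e
    rw [e]
    exact h.retSlot
  · have e := hk 8 8 (by omega) (by omega) (by omega)
    simp only [UInt64.reduceOfNat] at e
    rw [e]
    exact h.rbpSlot
  · have e := hk 16 8 (by omega) (by omega) (by omega)
    simp only [UInt64.reduceOfNat] at e
    rw [e]
    exact h.r15Slot
  · have e := hk 24 8 (by omega) (by omega) (by omega)
    simp only [UInt64.reduceOfNat] at e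
    rw [e]
    exact h.r14Slot
  · have e := hk 32 8 (by omega) (by omega) (by omega)
    simp only [UInt64.reduceOfNat] at e
    rw [e]
    exact h.r13Slot
  · have e := hk 40 8 (by omega) (by omega) (by omega)
    simp only [UInt64.reduceOfNat] at e
    rw [e]
    exact h.r12Slot
  · have e := hk 48 8 (by omega) (by omega) (by omega)
    simp only [UInt64.reduceOfNat] at e
    rw [e]
    exact h.rbxSlot
  · have e := hk 128 8 (by omega) (by omega) (by omega)
    simp only [UInt64.reduceOfNat] at e
    rw [e]
    exact h.fSlot
  · have e := hk 132 4 (by omega) (by omega) (by omega)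
    simp only [UInt64.reduceOfNat] at e
    rw [e]
    exact h.btSlot
  · have e := hk 152 4 (by omega) (by omega) (by omega)
    simp only [UInt64.reduceOfNat] at e
    rw [e]
    exact h.saveSlot
  · have e := hk 112 8 (by omega) (by omega) (by omega)
    simp only [UInt64.reduceOfNat] at e
    rw [e]
    exact h.vSlot
  · have e := hk 64 8 (by omega) (by omega) (by omega)
    simp only [UInt64.reduceOfNat] at e
    rw [e]
    exact h.uSlot
  · have e := hk 76 4 (by omega) (by omega) (by omega)
    simp only [UInt64.reduceOfNat] at e
    rw [e]
    exact h.nSlot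
  · have e := hk 176 8 (by omega) (by omega) (by omega)
    simp only [UInt64.reduceOfNat] at e
    rw [e]
    exact h.uMidSlot
  · have e := hk 120 4 (by omega) (by omega) (by omega)
    simp only [UInt64.reduceOfNat] at e
    rw [e]
    exact h.n2Slot
  · have e := hk 144 8 (by omega) (by omega) (by omega)
    simp only [UInt64.reduceOfNat] at e
    rw [e]
    exact h.n2x4Slot
  · have e := hk 148 4 (by omega) (by omega) (by omega)
    simp only [UInt64.reduceOfNat] at e
    rw [e]
    exact h.n8Slot
  · have e := hk 160 8 (by omega) (by omega) (by omega)
    simp only [UInt64.reduceOfNat] at e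
    rw [e]
    exact h.n2x4m32Slot
  · have e := hk 168 8 (by omega) (by omega) (by omega)
    simp only [UInt64.reduceOfNat] at e
    rw [e]
    exact h.n4x4Slot
  · have e := hk 136 4 (by omega) (by omega) (by omega)
    simp only [UInt64.reduceOfNat] at e
    rw [e]
    exact h.n4Slot


/-! ### The precondition at the call sites -/


/-- `ilog(n) = ld + 1`, in the form of ilog's post at the call site (`edi` = the dword `n`). -/
theorem ilog_val {N k : Nat} (hld : Mdct.Ld N k) :
    ilogVal (Word.part .w32 (Word.ofBV (BitVec.ofNat 32 N))).toInt = k + 1 := by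
  have hf := hld.isBlocksize.facts
  have e1 : (Word.ofBV (BitVec.ofNat 32 N)).toNat % 2 ^ 32 = N := by
    rw [toNat_ofBV32, BitVec.toNat_ofNat]
    omega
  have e2 : sint32 N = (N : Int) := by
    unfold sint32
    rw [if_pos (by omega)]
  rw [part32_toInt, e1, e2, hld.eq]
  have e3 : ((2 ^ k : Nat) : Int) = (2 : Int) ^ k := Int.natCast_pow 2 k
  rw [e3]
  exact ilogVal_two_pow k (by have := hld.le; omega)

/-- The sample buffer and the temp block do not meet the stack region. -/
theorem off_stack (hp : Pre others frames len A stored room ysz k c ue) :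
    (buf ue + 4 * n ue ≤ 0x700000 ∨ 0x800000 ≤ buf ue) ∧
    (tmp A ue + 2 * n ue ≤ 0x700000 ∨ 0x800000 ≤ tmp A ue) := by
  have hnle := hp.n_le
  have hb := hp.offStack _ hp.buf_blk
  have hr := hp.tmp_range
  have h1x := hp.ado.ok.AR1x
  have h2 := hp.ado.ok.AR2
  simp only [] at hb
  omega

/-- The sample buffer and the temp block end below the shadow region. -/
theorem below_shadow (hp : Pre others frames len A stored room ysz k c ue) :
    buf ue + 4 * n ue ≤ 0xC00000 ∧ tmp A ue + 2 * n ue ≤ 0xC00000 := by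
  have hnle := hp.n_le
  have hbufin := hp.ok.inside _ hp.buf_blk
  have hr := hp.tmp_range
  have h1 := hp.ado.ok.AR1
  have h2 := hp.ado.ok.AR2
  simp only [vblock] at hbufin
  omega

/-- **No shadow byte is written by a step that writes only stack below the entry rsp, floats of the buffer and floats of the
temp block** (the three windows of `Body.carry`). -/
theorem untouched_of_same (hp : Pre others frames len A stored room ysz k c ue)
    (htop : (ue.reg .rsp).toNat + 8 ≤ 0x800000) {m m' : Mem}
    (hs : Mem.SameExcept
      [⟨(ue.reg .rsp).toNat - 368, (ue.reg .rsp).toNat⟩, ⟨buf ue, buf ue + 4 * n ue⟩, ⟨tmp A ue, tmp A ue + 2 * n ue⟩]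
      m m') : ShadowUntouched m m' := by
  have hr := hp.tmp_range
  have hnle := hp.n_le
  have hbufin := hp.ok.inside _ hp.buf_blk
  have h1 := hp.ado.ok.AR1
  have h2 := hp.ado.ok.AR2
  simp only [vblock, voff] at hbufin
  apply hs.eqOn
  intro x hx
  simp only [List.mem_cons, List.mem_nil_iff, or_false] at hx
  rcases hx with rfl | rfl | rfl <;> simp only [] <;> omega

/-- **The shadow clause of a step-3 helper's precondition**: the callee is entered at `s` with `rsp = rsp₀ − 192` (the steady
stack pointer and the return address), no shadow byte written since the cut point `v`. -/
theorem callee_shadow (hb : Body u₀ others frames len A stored room ysz k c ue ret v) {s : State}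
    (hun : ShadowUntouched v.mem s.mem) (hrsp : s.reg .rsp = ue.reg .rsp - 192) :
    ShadowPre (A.newTempObj (2 * n ue) :: others) frames s := by
  have hroom := hb.entry.room
  have htop := hb.entry.top
  have halign := hb.entry.align
  simp only [vspec, conv_stackLo, conv_stackHi] at hroom htop
  have e : (s.reg .rsp).toNat = (ue.reg .rsp).toNat - 192 := by
    rw [hrsp]
    u_omega
  refine ⟨?_, ?_⟩
  · rw [e]
    exact (hb.shadow.untouched hun).lower (by omega) (by omega) (by omega)
  · intro o ho
    rcases List.mem_cons.mp ho with rfl | ho'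
    · show L.textHi ≤ A.B + (A.T - (r8 (2 * n ue) + 32))
      exact Nat.le_trans hb.pre.arenaText (Nat.le_add_right _ _)
    · exact hb.pre.shadow.offText o ho'

/-- The first `n / 2` floats of the sample buffer are live (with the temp block as one more object). -/
theorem buf_live (hp : Pre others frames len A stored room ysz k c ue) :
    LiveBytes (A.newTempObj (2 * n ue) :: others) frames (buf ue) (4 * (n ue / 2)) := by
  have hnle := hp.n_le
  refine LiveBytes.of_block (hp.blkLive _ _ hp.buf_blk) (Nat.le_refl _) ?_
  simp only []
  omega

/-- The twiddle table `A` is live: `2 n` bytes. -/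
theorem tabA_live (hp : Pre others frames len A stored room ysz k c ue) :
    LiveBytes (A.newTempObj (2 * n ue) :: others) frames (tabA ue) (2 * n ue) :=
  LiveBytes.of_block (hp.blkLive _ _ hp.tabA_blk) (Nat.le_refl _) (Nat.le_refl _)

/-- The pointer `A` as a 64-bit register value (`mov r13, [rbp − 40H]`). -/
theorem tabA_word (hp : Pre others frames len A stored room ysz k c ue) :
    (UInt64.ofNat (tabA ue)).toNat = tabA ue := by
  have hin := hp.ok.inside _ hp.tabA_blk
  simp only [vblock] at hin
  rw [UInt64.toNat_ofNat']
  omega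

/-- SH7 for `log2_4` in every memory that differs from the entry memory only on inverse_mdct's footprint. -/
theorem log2_at (hb : Body u₀ others frames len A stored room ysz k c ue ret v) {m : Mem}
    (hs : Mem.SameExcept ((spec others frames len A stored room ysz k c).footprint ue) ue.mem m) : Log2_4In m :=
  (hb.pre.inv.tables_kept hs (fun s h => storeOK hb.pre hb.entry s h)).log2


/-! ### The assertion at the return address of a call -/

/-- **Between two calls of segment 5** (`pc` = the return address of a call of a step-3 helper: `cut7` … `cut12`): the segment
was entered at `v` with `Body`; since then only stack below the entry rsp, floats of the buffer and floats of the temp block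
were written (`acc`); the slots of FRAME0 (`slots`, `aSlot`) and the two slots of step 3 are in place; the text, the ABI
invariant, the frame pointer and the steady stack pointer; and the five callee-saved registers hold the values `xbx` … `x15`
(the forms the walker leaves). -/
structure Between (u₀ : State) (others : List Obj) (frames : List (Nat × FrameLayout)) (len : Nat) (A : Arena)
    (stored room : Int) (ysz : Nat → Nat) (k c : Nat) (ue : State) (ret : Word) (v : State)
    (pc xbx x12 x13 x14 x15 : Word) (s : State) : Prop where
  /-- the return address of the call -/
  rip : s.rip = pc
  /-- the shared part of the cut-point assertion at the segment's entry `v` -/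
  body : Body u₀ others frames len A stored room ysz k c ue ret v
  /-- what the segment wrote so far -/
  acc : Mem.SameExcept
    [⟨(ue.reg .rsp).toNat - 368, (ue.reg .rsp).toNat⟩, ⟨buf ue, buf ue + 4 * n ue⟩, ⟨tmp A ue, tmp A ue + 2 * n ue⟩]
    v.mem s.mem
  /-- FRAME0 -/
  slots : Slots A ue ret s.mem
  /-- `q[rbp − 40H] = A` -/
  aSlot : s.mem.readLE (ue.reg .rsp - 72) 8 = tabA ue
  /-- `d[rbp − 60H] = ld + 1` -/
  ilogSlot : s.mem.readLE (ue.reg .rsp - 104) 4 = k + 1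
  /-- `d[rbp − 50H] = n2 − 1` -/
  n2m1Slot : s.mem.readLE (ue.reg .rsp - 88) 4 = n ue / 2 - 1
  /-- the image's text is unchanged -/
  code : CodeOK u₀ s.mem
  /-- DF = 0, the SSE masks -/
  abi : abiInv s
  /-- the steady stack pointer -/
  rsp : s.reg .rsp = ue.reg .rsp - 184
  /-- the frame pointer -/
  rbp : s.reg .rbp = ue.reg .rsp - 8
  /-- the callee-saved register rbx -/
  rbx : s.reg .rbx = xbx
  /-- the callee-saved register r12 -/
  r12 : s.reg .r12 = x12
  /-- the callee-saved register r13 -/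
  r13 : s.reg .r13 = x13
  /-- the callee-saved register r14 -/
  r14 : s.reg .r14 = x14
  /-- the callee-saved register r15 -/
  r15 : s.reg .r15 = x15

end Vorbis.Spec.inverse_mdct_5
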